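-- pv_equiv track=rewrite | github.com/billkondo/MAC0385 | suffix_array/build_suffix_array_linear.py | _build_T0_T1
-- ===== SOURCE A (Python) =====
-- from typing import Dict, List
--
-- def _max_letter_in_text(text: List[int]) -> int:
--     MAX_LETTER = 0
--     for c in text:
--         MAX_LETTER = max(MAX_LETTER, c)
--
--     return MAX_LETTER
--
-- def _build_T0_T1(text: List[int]) -> List[int]:
--     def _sort_text_triples(text: List[int]) -> List[int]:
--         MAX_LETTER = _max_letter_in_text(text)
--         n = len(text)
--
--         def _sort_triples_by_kth_letter(triples: List[int], k: int) -> List[int]: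
--             sorted_triples: List[int] = []
--             buckets: List[int] = [[] for _ in range(0, MAX_LETTER + 1)]
--
--             for i in range(0, n - 2):
--                 buckets[text[triples[i] + k]].append(triples[i])
--
--             for bucket in list(reversed(buckets)):
--                 sorted_triples.extend(bucket)
--
--             return sorted_triples
--
--         triples = [i for i in range(0, n - 2)]
--         for k in reversed(range(0, 3)):
--             triples = _sort_triples_by_kth_letter(triples, k)
--
--         return list(reversed(triples))
--
--     def _build_rank(triples: int) -> List[int]:
--         rank = [0 for _ in range(0, len(triples))]
--
--         for i in range(0, len(triples)):
--             rank[triples[i]] = i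
--
--         return rank
--
--     def _concatenate_T0_and_T1(rank: List[int]) -> List[int]:
--         T0_T1 = []
--         n = len(rank)
--
--         for i in range(0, n, 3):
--             T0_T1.append(rank[i])
--
--         for i in range(1, n, 3):
--             T0_T1.append(rank[i])
--
--         return T0_T1
--
--     triples = _sort_text_triples(text)
--     rank = _build_rank(triples)
--
--     return _concatenate_T0_and_T1(rank)
-- ===== SOURCE B (Python) =====
-- def _build_T0_T1(text):
--     n = len(text)
--     m = max(n - 2, 0)
--     order = sorted(range(m), key=lambda i: [text[i], text[i + 1], text[i + 2], -i])
--     rank = [0] * m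
--     for r, i in enumerate(order):
--         rank[i] = r
--     return rank[0::3] + rank[1::3]
-- ===== Notes on version B (the rewrite author's own statement) =====
-- stated objective: simpler
-- what changed: The 3-pass LSD bucket radix sort (per-letter bucket lists emitted in descending order, then a final reversal) is replaced by one comparison sort of the triple start positions keyed by (text[i], text[i+1], text[i+2], -i), and the two concatenation loops by slices rank[0::3] + rank[1::3].
-- outside the precondition, e.g. on _build_T0_T1([-1, 0, 0, 0]): A returns [1, 0], B returns [0, 1]; on _build_T0_T1([-3, 0, 0]): A raises IndexError, B returns [0]
import Mathlib
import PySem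

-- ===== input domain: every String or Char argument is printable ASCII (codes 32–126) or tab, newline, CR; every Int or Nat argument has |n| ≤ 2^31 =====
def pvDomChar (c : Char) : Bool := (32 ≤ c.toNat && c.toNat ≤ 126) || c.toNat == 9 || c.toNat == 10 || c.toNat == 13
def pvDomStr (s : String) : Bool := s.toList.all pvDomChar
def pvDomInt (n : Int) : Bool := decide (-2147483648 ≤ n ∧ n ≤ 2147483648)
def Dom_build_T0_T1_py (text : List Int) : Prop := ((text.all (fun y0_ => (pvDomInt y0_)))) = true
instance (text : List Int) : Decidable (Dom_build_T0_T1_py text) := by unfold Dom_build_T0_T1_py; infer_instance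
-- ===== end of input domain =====

-- B replaces A's 3-pass LSD bucket radix sort (buckets emitted backwards, final reversal) by one
-- comparison sort keyed by (text[i], text[i+1], text[i+2], -i), and the concatenation loops by slices (objective: simpler).

-- ===== PORT A =====
def maxLetterA (text : List Int) : Int := text.foldl (fun M c => max M c) 0

def sortPassA (text : List Int) (MAX n : Int) (triples : List Int) (k : Int) : List Int :=
  let buckets0 : List (List Int) := (PySem.List.pyRange 0 (MAX + 1)).map (fun _ => ([] : List Int))
  let buckets := (PySem.List.pyRange 0 (n - 2)).foldl
    (fun bs i =>
      let t := PySem.List.pyGetD triples i 0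
      let c := PySem.List.pyGetD text (t + k) 0
      PySem.List.pySetD bs c (PySem.List.pyGetD bs c [] ++ [t])) buckets0
  buckets.reverse.foldl (fun acc bucket => acc ++ bucket) []

def sortTextTriplesA (text : List Int) : List Int :=
  let MAX := maxLetterA text
  let n : Int := PySem.List.len text
  let triples0 := PySem.List.pyRange 0 (n - 2)
  let triples := ((PySem.List.pyRange 0 3).reverse).foldl (fun tr k => sortPassA text MAX n tr k) triples0
  triples.reverse

def buildRankA (triples : List Int) : List Int :=
  let rank0 := (PySem.List.pyRange 0 (PySem.List.len triples)).map (fun _ => (0 : Int))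
  (PySem.List.pyRange 0 (PySem.List.len triples)).foldl
    (fun rank i => PySem.List.pySetD rank (PySem.List.pyGetD triples i 0) i) rank0

def concatA (rank : List Int) : List Int :=
  let n := PySem.List.len rank
  let T0 := (PySem.List.pyRange 0 n 3).foldl (fun acc i => acc ++ [PySem.List.pyGetD rank i 0]) []
  (PySem.List.pyRange 1 n 3).foldl (fun acc i => acc ++ [PySem.List.pyGetD rank i 0]) T0

def build_T0_T1_py (text : List Int) : List Int :=
  concatA (buildRankA (sortTextTriplesA text))

-- ===== PORT B =====
def pvKeyB (text : List Int) (i : Int) : List Int :=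
  [PySem.List.pyGetD text i 0, PySem.List.pyGetD text (i + 1) 0,
   PySem.List.pyGetD text (i + 2) 0, -i]

def build_T0_T1_py_alt (text : List Int) : List Int :=
  let n : Int := PySem.List.len text
  let m : Int := max (n - 2) 0
  let order := PySem.List.sorted (PySem.List.pyRange 0 m) (pvKeyB text) false
  let rank := (PySem.List.enumerate order).foldl
    (fun rank p => PySem.List.pySetD rank p.2 p.1) (List.replicate m.toNat 0)
  ((PySem.List.slice? rank (some 0) none 3).getD []) ++ ((PySem.List.slice? rank (some 1) none 3).getD [])

-- ===== PRECONDITION & SPEC =====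
-- Pre_ restricts texts long enough to contain a triple to nonnegative letters, the natural alphabet
-- domain of this suffix-array step: on a negative letter A's bucket index text[t+k] is negative, so A
-- either raises IndexError or returns an order that is an accident of Python's negative-index
-- wraparound into the bucket list.
def Pre_build_T0_T1_py (text : List Int) : Prop := text.length < 3 ∨ ∀ c ∈ text, 0 ≤ c
instance (text : List Int) : Decidable (Pre_build_T0_T1_py text) := by unfold Pre_build_T0_T1_py; infer_instance
def pvWitness_build_T0_T1_py : List Int := [1, 0, 2, 1, 0]

def Spec_build_T0_T1_py (text : List Int) (out : List Int) : Prop := out = build_T0_T1_py_alt text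
instance (text : List Int) (out : List Int) : Decidable (Spec_build_T0_T1_py text out) := by unfold Spec_build_T0_T1_py; infer_instance

-- ===== CLAIM (what is proved, stated in full; the proofs are below) =====
def Claim_equal_build_T0_T1_py : Prop := ∀ (text : List Int), Dom_build_T0_T1_py text → Pre_build_T0_T1_py text → Spec_build_T0_T1_py text (build_T0_T1_py text)

-- ===== LEMMAS AND PROOFS =====

-- the k-th letter of the triple starting at t
def pvLet (text : List Int) (k t : Int) : Int := PySem.List.pyGetD text (t + k) 0

-- the bucket fold of one radix pass, characterized bucket by bucket
theorem pvBucketFold (f : Int → Int) (ts : List Int) : ∀ (bs : List (List Int)),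
    (∀ t ∈ ts, 0 ≤ f t ∧ (f t).toNat < bs.length) →
    ∀ j : Nat,
      (ts.foldl (fun bs t => PySem.List.pySetD bs (f t) (PySem.List.pyGetD bs (f t) [] ++ [t])) bs)[j]?
        = (bs[j]?).map (fun l => l ++ ts.filter (fun t => f t = (j : Int))) := by
  induction ts with
  | nil => intro bs _ j; simp
  | cons t ts' ih =>
    intro bs h j
    obtain ⟨hnn, hlt⟩ := h t (by simp)
    have hset : PySem.List.pySetD bs (f t) (PySem.List.pyGetD bs (f t) [] ++ [t])
        = bs.set (f t).toNat (bs[(f t).toNat] ++ [t]) := by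
      rw [PySem.List.pySetD_of_nonneg _ _ hnn, PySem.List.pyGetD_of_nonneg _ _ hnn,
        List.getD_eq_getElem?_getD, List.getElem?_eq_getElem hlt]
      rfl
    rw [List.foldl_cons, hset,
      ih _ (fun u hu => by simpa [List.length_set] using h u (by simp [hu]))]
    by_cases hj : (f t).toNat = j
    · have hjlt : j < bs.length := hj ▸ hlt
      have hfj : f t = (j : Int) := by omega
      rw [List.getElem?_set, if_pos hj, if_pos (hj ▸ hlt), List.getElem?_eq_getElem hjlt]
      simp only [List.filter_cons, hfj, decide_true, Option.map_some]
      simp [List.append_assoc]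
    · have hfj : ¬ (f t = (j : Int)) := by omega
      rw [List.getElem?_set, if_neg hj]
      simp [hfj]

-- the bucket phase of one pass, over an abstract letter function f
theorem pvPassGen (f : Int → Int) (MAX : Int) (triples : List Int)
    (hf : ∀ t ∈ triples, 0 ≤ f t ∧ f t ≤ MAX) :
    (triples.foldl (fun bs t => PySem.List.pySetD bs (f t) (PySem.List.pyGetD bs (f t) [] ++ [t]))
        ((PySem.List.pyRange 0 (MAX + 1)).map (fun _ => ([] : List Int)))).reverse.foldl
        (fun acc bucket => acc ++ bucket) []
      = (PySem.List.pyRange 0 (MAX + 1)).reverse.flatMap (fun b => triples.filter (fun t => f t = b)) := by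
  have hlen0 : ((PySem.List.pyRange 0 (MAX + 1)).map (fun _ => ([] : List Int))).length
      = (MAX + 1).toNat := by
    simp [PySem.List.pyRange_one]
  have hbuckets : triples.foldl
        (fun bs t => PySem.List.pySetD bs (f t) (PySem.List.pyGetD bs (f t) [] ++ [t]))
        ((PySem.List.pyRange 0 (MAX + 1)).map (fun _ => ([] : List Int)))
      = (PySem.List.pyRange 0 (MAX + 1)).map (fun b => triples.filter (fun t => f t = b)) := by
    apply List.ext_getElem?
    intro j
    rw [pvBucketFold f triples _ (by
      intro t ht
      obtain ⟨h1, h2⟩ := hf t ht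
      refine ⟨h1, ?_⟩
      rw [hlen0]
      omega) j]
    by_cases hj : j < (MAX + 1).toNat
    · have hjr : j < (PySem.List.pyRange 0 (MAX + 1)).length := by
        simp [PySem.List.pyRange_one]; omega
      rw [List.getElem?_map, List.getElem?_map,
        List.getElem?_eq_getElem hjr, PySem.List.getElem_pyRange_one]
      simp
    · have hjr : ¬ j < (PySem.List.pyRange 0 (MAX + 1)).length := by
        simp [PySem.List.pyRange_one]; omega
      rw [List.getElem?_map, List.getElem?_map, List.getElem?_eq_none (by omega)]
      simp
  rw [hbuckets]
  have hcat := PySem.List.foldl_append_eq_flatMap (id : List Int → List Int)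
    ((PySem.List.pyRange 0 (MAX + 1)).map (fun b => triples.filter (fun t => f t = b))).reverse []
  simp only [List.nil_append] at hcat
  have h2 : (((PySem.List.pyRange 0 (MAX + 1)).map
        (fun b => triples.filter (fun t => f t = b))).reverse).foldl
        (fun acc bucket => acc ++ bucket) []
      = List.flatMap id (((PySem.List.pyRange 0 (MAX + 1)).map
        (fun b => triples.filter (fun t => f t = b))).reverse) := hcat
  rw [h2, ← List.map_reverse]
  rw [List.flatMap_map]
  simp

-- one pass equals: concatenate, over bucket values in descending order, the f-fiber of the input
theorem pvPassEq (text : List Int) (MAX n : Int) (triples : List Int) (k : Int)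
    (hlen : (triples.length : Int) = max (n - 2) 0)
    (hf : ∀ t ∈ triples, 0 ≤ pvLet text k t ∧ pvLet text k t ≤ MAX) :
    sortPassA text MAX n triples k
      = (PySem.List.pyRange 0 (MAX + 1)).reverse.flatMap
          (fun b => triples.filter (fun t => pvLet text k t = b)) := by
  unfold sortPassA
  show (List.foldl
      (fun acc j => (fun bs t => PySem.List.pySetD bs (PySem.List.pyGetD text (t + k) 0)
          (PySem.List.pyGetD bs (PySem.List.pyGetD text (t + k) 0) [] ++ [t]))
        acc (PySem.List.pyGetD triples j 0))
      ((PySem.List.pyRange 0 (MAX + 1)).map (fun _ => ([] : List Int)))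
      (PySem.List.pyRange 0 (n - 2))).reverse.foldl (fun acc bucket => acc ++ bucket) [] = _
  have hrange : PySem.List.pyRange 0 (n - 2) = PySem.List.pyRange 0 (PySem.List.len triples) := by
    rw [PySem.List.pyRange_one, PySem.List.pyRange_one]
    have hts : (n - 2 - 0).toNat = (PySem.List.len triples - 0).toNat := by
      simp only [PySem.List.len_eq]
      omega
    rw [hts]
  rw [hrange, PySem.List.foldl_pyRange_pyGetD triples (0 : Int)
    (fun bs t => PySem.List.pySetD bs (PySem.List.pyGetD text (t + k) 0)
      (PySem.List.pyGetD bs (PySem.List.pyGetD text (t + k) 0) [] ++ [t])) _ (le_refl 0)]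
  simp only [Int.toNat_zero, List.drop_zero]
  exact pvPassGen (fun t => PySem.List.pyGetD text (t + k) 0) MAX triples hf

theorem pvFlatMapFilterPerm {α : Type} (f : α → Int) (vals : List Int) :
    ∀ (l : List α), vals.Nodup → (∀ x ∈ l, f x ∈ vals) →
    (vals.flatMap (fun b => l.filter (fun x => f x = b))).Perm l := by
  induction vals with
  | nil =>
    intro l _ hm
    have : l = [] := by
      cases l with
      | nil => rfl
      | cons x xs => exact absurd (hm x (by simp)) (by simp)
    simp [this]
  | cons v vs ih =>
    intro l hnd hm
    have hvnotin : v ∉ vs := (List.nodup_cons.mp hnd).1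
    have hstep : ∀ b ∈ vs, l.filter (fun x => f x = b)
        = (l.filter (fun x => ¬ (f x = v))).filter (fun x => f x = b) := by
      intro b hb
      have hbv : b ≠ v := fun h => hvnotin (h ▸ hb)
      rw [List.filter_filter]
      refine List.filter_congr ?_
      intro x _
      by_cases h : f x = b
      · simp [h, hbv]
      · simp [h]
    have hcongr : vs.flatMap (fun b => l.filter (fun x => f x = b))
        = vs.flatMap (fun b => (l.filter (fun x => ¬ (f x = v))).filter (fun x => f x = b)) :=
      List.flatMap_congr hstep
    have hperm : (vs.flatMap (fun b => (l.filter (fun x => ¬ (f x = v))).filter (fun x => f x = b))).Perm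
        (l.filter (fun x => ¬ (f x = v))) := by
      refine ih _ (List.nodup_cons.mp hnd).2 ?_
      intro x hx
      have hmem := List.mem_filter.mp hx
      have := hm x hmem.1
      simp only [List.mem_cons] at this
      rcases this with h | h
      · exact absurd h (by simpa using hmem.2)
      · exact h
    have h1 : (v :: vs).flatMap (fun b => l.filter (fun x => f x = b))
        = l.filter (fun x => f x = v) ++ vs.flatMap (fun b => l.filter (fun x => f x = b)) := by
      simp [List.flatMap_cons]
    rw [h1, hcongr]
    refine List.Perm.trans (List.Perm.append_left _ hperm) ?_
    have := List.filter_append_perm (fun x => decide (f x = v)) l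
    simpa using this

theorem pvFlatMapFilterPairwise {α : Type} (f : α → Int) (S : α → α → Prop) (vals : List Int) :
    ∀ (l : List α), vals.Pairwise (fun a b => b < a) → l.Pairwise S →
    (vals.flatMap (fun b => l.filter (fun x => f x = b))).Pairwise
      (fun x y => f y < f x ∨ (f x = f y ∧ S x y)) := by
  induction vals with
  | nil => intro l _ _; simp
  | cons v vs ih =>
    intro l hv hS
    rw [List.flatMap_cons, List.pairwise_append]
    refine ⟨?_, ih l hv.tail hS, ?_⟩
    · refine (hS.filter _).imp_of_mem ?_
      intro a b ha hb hab
      have hfa : f a = v := by simpa using (List.mem_filter.mp ha).2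
      have hfb : f b = v := by simpa using (List.mem_filter.mp hb).2
      exact Or.inr ⟨hfa.trans hfb.symm, hab⟩
    · intro a ha b hb
      have hfa : f a = v := by simpa using (List.mem_filter.mp ha).2
      obtain ⟨c, hc, hbc⟩ := List.mem_flatMap.mp hb
      have hfb : f b = c := by simpa using (List.mem_filter.mp hbc).2
      have : c < v := List.rel_of_pairwise_cons hv hc
      exact Or.inl (by rw [hfa, hfb]; exact this)

-- letters of admissible triples are nonnegative and bounded by the maximal letter
theorem pvHf (text : List Int) (h0 : 3 ≤ text.length → ∀ c ∈ text, 0 ≤ c) (k : Int) (hk0 : 0 ≤ k) (hk2 : k ≤ 2)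
    (l : List Int) (hl : ∀ t ∈ l, t ∈ PySem.List.pyRange 0 ((text.length : Int) - 2)) :
    ∀ t ∈ l, 0 ≤ pvLet text k t ∧ pvLet text k t ≤ maxLetterA text := by
  intro t ht
  have hm := PySem.List.mem_pyRange_one.mp (hl t ht)
  have hnn : 0 ≤ t + k := by omega
  have hlt : (t + k).toNat < text.length := by omega
  unfold pvLet
  rw [PySem.List.pyGetD_of_nonneg _ _ hnn, List.getD_eq_getElem _ _ hlt]
  exact ⟨h0 (by omega) _ (List.getElem_mem _),
    (PySem.List.le_foldl_max text 0).2 _ (List.getElem_mem _)⟩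

-- permutation and stable-descending order produced by one pass
theorem pvPassFacts (text : List Int) (MAX n : Int) (l : List Int) (k : Int) (S : Int → Int → Prop)
    (hperm : l.Perm (PySem.List.pyRange 0 (n - 2)))
    (hf : ∀ t ∈ l, 0 ≤ pvLet text k t ∧ pvLet text k t ≤ MAX)
    (hS : l.Pairwise S) :
    (sortPassA text MAX n l k).Perm (PySem.List.pyRange 0 (n - 2)) ∧
      (sortPassA text MAX n l k).Pairwise
        (fun x y => pvLet text k y < pvLet text k x ∨ (pvLet text k x = pvLet text k y ∧ S x y)) := by
  have hlen : (l.length : Int) = max (n - 2) 0 := by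
    rw [hperm.length_eq, PySem.List.length_pyRange_one]
    omega
  rw [pvPassEq text MAX n l k hlen hf]
  constructor
  · refine (pvFlatMapFilterPerm _ _ l (List.nodup_reverse.mpr (PySem.List.nodup_pyRange_one 0 (MAX + 1))) ?_).trans hperm
    intro x hx
    rw [List.mem_reverse, PySem.List.mem_pyRange_one]
    obtain ⟨h1, h2⟩ := hf x hx
    omega
  · refine pvFlatMapFilterPairwise _ S _ l ?_ hS
    rw [List.pairwise_reverse]
    exact PySem.List.pairwise_lt_pyRange_one 0 (MAX + 1)

-- the descending three-letter order (with ascending-position ties), read backwards, is key order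
theorem pvKeyLtOf (text : List Int) (x y : Int)
    (h : pvLet text 0 y < pvLet text 0 x ∨ (pvLet text 0 x = pvLet text 0 y ∧
         (pvLet text 1 y < pvLet text 1 x ∨ (pvLet text 1 x = pvLet text 1 y ∧
          (pvLet text 2 y < pvLet text 2 x ∨ (pvLet text 2 x = pvLet text 2 y ∧ x < y)))))) :
    pvKeyB text y < pvKeyB text x := by
  have hx0 : ∀ i : Int, PySem.List.pyGetD text i 0 = pvLet text 0 i := by
    intro i; simp [pvLet]
  unfold pvKeyB
  rw [hx0 x, hx0 y]
  show [pvLet text 0 y, pvLet text 1 y, pvLet text 2 y, -y]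
      < [pvLet text 0 x, pvLet text 1 x, pvLet text 2 x, -x]
  simp only [List.cons_lt_cons_iff]
  rcases h with h | ⟨e0, h⟩
  · exact Or.inl h
  · refine Or.inr ⟨e0.symm, ?_⟩
    rcases h with h | ⟨e1, h⟩
    · exact Or.inl h
    · refine Or.inr ⟨e1.symm, ?_⟩
      rcases h with h | ⟨e2, h⟩
      · exact Or.inl h
      · exact Or.inr ⟨e2.symm, Or.inl (by omega)⟩

-- ranges clamp at zero
theorem pvRangeClamp (a : Int) : PySem.List.pyRange 0 a = PySem.List.pyRange 0 (max a 0) := by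
  rw [PySem.List.pyRange_one, PySem.List.pyRange_one]
  have : (a - 0).toNat = (max a 0 - 0).toNat := by omega
  rw [this]

-- A's triples equal B's sorted order
theorem pvTriplesEq (text : List Int) (h0 : 3 ≤ text.length → ∀ c ∈ text, 0 ≤ c) :
    sortTextTriplesA text
      = PySem.List.sorted (PySem.List.pyRange 0 (max ((PySem.List.len text) - 2) 0)) (pvKeyB text) false := by
  simp only [PySem.List.len_eq]
  have hunf : sortTextTriplesA text
      = (sortPassA text (maxLetterA text) ((text.length : Int))
          (sortPassA text (maxLetterA text) ((text.length : Int))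
            (sortPassA text (maxLetterA text) ((text.length : Int))
              (PySem.List.pyRange 0 ((text.length : Int) - 2)) 2) 1) 0).reverse := by
    simp only [sortTextTriplesA, PySem.List.len_eq]
    rw [show (PySem.List.pyRange 0 3).reverse = [2, 1, 0] from by decide]
    simp only [List.foldl_cons, List.foldl_nil]
  rw [hunf]
  have h2 := pvPassFacts text (maxLetterA text) ((text.length : Int))
    (PySem.List.pyRange 0 ((text.length : Int) - 2)) 2 (fun a b => a < b)
    (List.Perm.refl _)
    (pvHf text h0 2 (by omega) (by omega) _ (fun t ht => ht))
    (PySem.List.pairwise_lt_pyRange_one 0 _)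
  have h1 := pvPassFacts text (maxLetterA text) ((text.length : Int)) _ 1 _
    h2.1 (pvHf text h0 1 (by omega) (by omega) _ (fun t ht => h2.1.mem_iff.mp ht)) h2.2
  have hp0 := pvPassFacts text (maxLetterA text) ((text.length : Int)) _ 0 _
    h1.1 (pvHf text h0 0 (by omega) (by omega) _ (fun t ht => h1.1.mem_iff.mp ht)) h1.2
  have hperm' : ((sortPassA text (maxLetterA text) ((text.length : Int))
      (sortPassA text (maxLetterA text) ((text.length : Int))
        (sortPassA text (maxLetterA text) ((text.length : Int))
          (PySem.List.pyRange 0 ((text.length : Int) - 2)) 2) 1) 0).reverse).Perm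
      (PySem.List.pyRange 0 (max ((text.length : Int) - 2) 0)) := by
    refine ((List.reverse_perm _).trans hp0.1).trans ?_
    rw [← pvRangeClamp]
  have hpw' : ((sortPassA text (maxLetterA text) ((text.length : Int))
      (sortPassA text (maxLetterA text) ((text.length : Int))
        (sortPassA text (maxLetterA text) ((text.length : Int))
          (PySem.List.pyRange 0 ((text.length : Int) - 2)) 2) 1) 0).reverse).Pairwise
      (fun a b => pvKeyB text a < pvKeyB text b) := by
    rw [List.pairwise_reverse]
    refine hp0.2.imp ?_
    intro a b hab
    exact pvKeyLtOf text a b hab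
  have H := PySem.List.sorted_eq_of_perm_of_pairwise_lt
    (PySem.List.pyRange 0 (max ((text.length : Int) - 2) 0)) _ (pvKeyB text) hperm' hpw'
  rw [← H]
  congr 1

-- the step-3 slice is the map over the step-3 range
theorem pvSlice3 (xs : List Int) (a : Int) (ha : 0 ≤ a) :
    (PySem.List.slice? xs (some a) none 3).getD []
      = (PySem.List.pyRange a (PySem.List.len xs) 3).map (fun i => PySem.List.pyGetD xs i 0) := by
  rw [PySem.List.pyRange_of_pos a _ (by norm_num)]
  unfold PySem.List.slice? PySem.List.sliceIndices
  norm_num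
  rw [if_neg (by omega : ¬ a < 0)]
  by_cases hle : a ≤ (xs.length : Int)
  · rw [min_eq_left hle]
    have hcong : ∀ k ∈ List.range (if a < (xs.length : Int) then
          (((xs.length : Int) - a + 3 - 1) / 3).toNat else 0),
        xs[(a + 3 * (k : Int)).toNat]? = some (PySem.List.pyGetD xs (a + 3 * (k : Int)) 0) := by
      intro k hk
      rw [List.mem_range] at hk
      by_cases hal : a < (xs.length : Int)
      · rw [if_pos hal] at hk
        have h3 : (((xs.length : Int) - a + 3 - 1) / 3) * 3 ≤ (xs.length : Int) - a + 3 - 1 :=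
          Int.ediv_mul_le _ (by norm_num)
        have hidx : (a + 3 * (k : Int)).toNat < xs.length := by omega
        rw [List.getElem?_eq_getElem hidx,
          PySem.List.pyGetD_of_nonneg _ _ (by omega), List.getD_eq_getElem _ _ hidx]
      · rw [if_neg hal] at hk
        omega
    rw [List.filterMap_congr hcong]
    rw [show (fun k : Nat => some (PySem.List.pyGetD xs (a + 3 * (k : Int)) 0))
        = some ∘ (fun k : Nat => PySem.List.pyGetD xs (a + 3 * (k : Int)) 0) from rfl,
      List.filterMap_eq_map]
    rfl
  · rw [min_eq_right (by omega), if_neg (lt_irrefl _), if_neg (by omega)]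
    simp

-- A's rank loop is B's enumerate loop
theorem pvRankEq (l : List Int) :
    buildRankA l
      = (PySem.List.enumerate l).foldl (fun r p => PySem.List.pySetD r p.2 p.1)
          (List.replicate l.length 0) := by
  unfold buildRankA
  rw [PySem.List.enumerate_eq_map_pyRange l 0, List.foldl_map]
  show List.foldl (fun rank i => PySem.List.pySetD rank (PySem.List.pyGetD l i 0) i)
      ((PySem.List.pyRange 0 (PySem.List.len l)).map (fun _ => (0 : Int)))
      (PySem.List.pyRange 0 (PySem.List.len l))
    = List.foldl (fun rank i => PySem.List.pySetD rank (PySem.List.pyGetD l i 0) i)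
      (List.replicate l.length 0) (PySem.List.pyRange 0 (PySem.List.len l))
  congr 1
  rw [List.eq_replicate_iff]
  constructor
  · simp [PySem.List.pyRange_one]
  · intro b hb
    simp only [List.mem_map] at hb
    obtain ⟨_, _, h⟩ := hb
    exact h.symm

-- A's two stride-3 append loops are B's two stride-3 slices
theorem pvConcatEq (rank : List Int) :
    concatA rank
      = ((PySem.List.slice? rank (some 0) none 3).getD [])
        ++ ((PySem.List.slice? rank (some 1) none 3).getD []) := by
  unfold concatA
  rw [pvSlice3 rank 0 (by omega), pvSlice3 rank 1 (by omega)]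
  rw [PySem.List.foldl_append_singleton_eq_map (fun i => PySem.List.pyGetD rank i 0)
      (PySem.List.pyRange 1 (PySem.List.len rank) 3),
    PySem.List.foldl_append_singleton_eq_map (fun i => PySem.List.pyGetD rank i 0)
      (PySem.List.pyRange 0 (PySem.List.len rank) 3)]
  simp

-- ===== VERDICT (by name: the statement is the Claim_ definition above) =====
theorem build_T0_T1_py_spec : Claim_equal_build_T0_T1_py := by
  intro text _ hpre
  have h0 : 3 ≤ text.length → ∀ c ∈ text, 0 ≤ c := by
    rcases hpre with h | h
    · intro h3; omega
    · intro _; exact h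
  unfold Spec_build_T0_T1_py build_T0_T1_py build_T0_T1_py_alt
  simp only []
  rw [pvTriplesEq text h0, pvRankEq, pvConcatEq]
  have hlen : (PySem.List.sorted
        (PySem.List.pyRange 0 (max ((PySem.List.len text) - 2) 0)) (pvKeyB text) false).length
      = (max ((PySem.List.len text) - 2) 0).toNat := by
    rw [PySem.List.length_sorted, PySem.List.length_pyRange_one]
    omega
  rw [hlen]
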